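-- pv_equiv track=rewrite | github.com/arcursino/FATEC | Masanori/mergesort.py | Distancias
-- ===== SOURCE A (Python) =====
-- A = [[0, 1, 0, 0, 0, 0],
--      [0, 0, 1, 0, 0, 0],
--      [0, 0, 0, 0, 1, 0],
--      [0, 0, 1, 0, 1, 0],
--      [1, 0, 0, 0, 0, 0],
--      [0, 1, 0, 0, 0, 0]]
--
-- def Distancias(n, origem):
--   d = [-1] * n
--   d[origem] = 0
--   f = []
--   f.append(origem)
--   while len(f) > 0:
--     x = f[0]
--     del f[0]
--     for y in range(n):
--       if A[x][y] == 1 and d[y] == -1: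
--         d[y] = d[x] + 1
--         f.append(y)
--   return d
-- ===== SOURCE B (Python) =====
-- A = [[0, 1, 0, 0, 0, 0],
--      [0, 0, 1, 0, 0, 0],
--      [0, 0, 0, 0, 1, 0],
--      [0, 0, 1, 0, 1, 0],
--      [1, 0, 0, 0, 0, 0],
--      [0, 1, 0, 0, 0, 0]]
--
-- def _nb(y, d, n):
--   # first already-reached in-neighbour of y, or -1 if none
--   for x in range(n):
--     if A[x][y] == 1 and d[x] != -1:
--       return d[x] + 1
--   return -1
--
-- def Distancias(n, origem):
--   # round-based relaxation: n synchronous rounds, each rebuilding d from the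
--   # previous d; no queue, no frontier.  A vertex y at BFS distance k becomes
--   # reachable in round k, and every already-reached in-neighbour then has
--   # distance exactly k-1, so taking the first one is exact.
--   d = [-1] * n
--   d[origem] = 0
--   for _ in range(n):
--     d = [dy if dy != -1 else _nb(y, d, n) for y, dy in enumerate(d)]
--   return d
-- ===== Notes on version B (the rewrite author's own statement) =====
-- stated objective: alternative
-- what changed: Replaces A's FIFO-queue BFS (pop front, push newly discovered vertices) with queue-free round-based relaxation: n synchronous rounds, each rebuilding the whole distance list by giving every still-unreached vertex d[x]+1 from its first already-reached in-neighbour.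
-- intended difference: For negative origem with 2 <= n < 6 (minus the three starts where the outputs happen to coincide, excluded from D_), A marks d[origem+n]=0 but explores from row origem+6 of the fixed 6-row matrix (negative indexing wraps mod n on d but mod 6 on A), returning distances inconsistent with the marked start; B runs BFS consistently from vertex origem+n, the intended start. — e.g. on Distancias(4, -2): A returns [1, 2, 0, -1], B returns [-1, -1, 0, -1]
import Mathlib
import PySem

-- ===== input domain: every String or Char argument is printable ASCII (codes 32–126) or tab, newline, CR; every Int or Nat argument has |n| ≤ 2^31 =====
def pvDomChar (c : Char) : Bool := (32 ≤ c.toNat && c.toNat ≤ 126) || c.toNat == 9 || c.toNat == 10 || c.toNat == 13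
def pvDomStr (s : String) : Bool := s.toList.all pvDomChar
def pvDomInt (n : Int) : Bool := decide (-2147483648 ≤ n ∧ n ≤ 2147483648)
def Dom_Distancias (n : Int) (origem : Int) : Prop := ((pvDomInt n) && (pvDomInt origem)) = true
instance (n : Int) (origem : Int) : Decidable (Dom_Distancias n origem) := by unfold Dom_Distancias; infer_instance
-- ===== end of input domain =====

-- B replaces A's FIFO-queue BFS with queue-free round-based relaxation (n synchronous
-- rounds, each rebuilding the distance list from in-neighbours); same value on Pre_
-- outside D_ (A's inconsistent negative-index wraparound, see D_ below).

-- ===== PORT A =====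
-- the module constant A (adjacency matrix)
def pyA : List (List Int) :=
  [[0, 1, 0, 0, 0, 0],
   [0, 0, 1, 0, 0, 0],
   [0, 0, 0, 0, 1, 0],
   [0, 0, 1, 0, 1, 0],
   [1, 0, 0, 0, 0, 0],
   [0, 1, 0, 0, 0, 0]]

-- Python list read xs[i] (negative indices wrap); default never reached inside Pre_
def pget (xs : List Int) (i : Int) : Int := (PySem.List.pyGet? xs i).getD 0
-- Python row read A[i]
def pgetRow (i : Int) : List Int := (PySem.List.pyGet? pyA i).getD []
-- Python list assignment xs[i] = v (negative indices wrap); exact when the index is in range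
def pset (xs : List Int) (i : Int) (v : Int) : List Int :=
  let j : Int := if i < 0 then i + xs.length else i
  xs.set j.toNat v

-- the while loop of A: state (f, d); fuel bounds the number of iterations (each vertex is
-- enqueued at most once, so n.toNat + 1 iterations always suffice inside Pre_)
def distLoopA (n : Int) : Nat → List Int → List Int → List Int
  | 0, _, d => d
  | fuel + 1, f, d =>
    match f with
    | [] => d
    | x :: rest =>
      let st := (PySem.List.pyRange 0 n 1).foldl
        (fun (st : List Int × List Int) y =>
          if pget (pgetRow x) y == 1 && pget st.2 y == -1 then
            (st.1 ++ [y], pset st.2 y (pget st.2 x + 1))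
          else st)
        (rest, d)
      distLoopA n fuel st.1 st.2

def Distancias (n : Int) (origem : Int) : List Int :=
  let d := List.replicate n.toNat (-1 : Int)
  let d := pset d origem 0
  distLoopA n (n.toNat + 1) [origem] d

-- ===== PORT B =====
-- _nb of Source B: first already-reached in-neighbour of y (recursion over range(n)), or -1
def nbB (y : Int) (d : List Int) : List Int → Int
  | [] => -1
  | x :: rest =>
    if pget (pgetRow x) y == 1 && pget d x != -1 then pget d x + 1 else nbB y d rest

-- n relaxation rounds, each rebuilding d by a map over enumerate(d)
def Distancias_alt (n : Int) (origem : Int) : List Int :=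
  let d0 := pset (List.replicate n.toNat (-1 : Int)) origem 0
  (PySem.List.pyRange 0 n 1).foldl
    (fun d _ =>
      (PySem.List.enumerate d).map
        (fun p => if p.2 != -1 then p.2 else nbB p.1 d (PySem.List.pyRange 0 n 1)))
    d0

-- ===== PRECONDITION & SPEC =====
-- exactly the inputs on which the Python A returns: otherwise d[origem] or A[x][y] raises IndexError
def Pre_Distancias (n : Int) (origem : Int) : Prop :=
  1 ≤ n ∧ n ≤ (pyA.length : Int) ∧ -n ≤ origem ∧ origem < n
instance (n : Int) (origem : Int) : Decidable (Pre_Distancias n origem) := by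
  unfold Pre_Distancias; infer_instance

def pvWitness_Distancias : Int × Int := (1, 0)

-- For negative origem with 2 ≤ n < 6, A marks d[origem+n] = 0 yet explores from row
-- origem+6 of the fixed 6-row matrix (negative indexing wraps mod n on d but mod 6 on A),
-- returning distances inconsistent with the marked start; B runs BFS consistently from
-- vertex origem+n, the intended start.  Excluded: n = 1 and n = 6 (the two wraps coincide
-- observably) and the three starts whose misread row happens to yield the same distances;
-- inside D_ the outputs differ everywhere (theorem Distancias_tight).
def D_Distancias (n : Int) (origem : Int) : Prop :=
  2 ≤ n ∧ n < (pyA.length : Int) ∧ origem < 0 ∧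
  ¬(n = 2 ∧ origem = -1) ∧ ¬(n = 4 ∧ origem = -3) ∧ ¬(n = 5 ∧ origem = -3)
instance (n : Int) (origem : Int) : Decidable (D_Distancias n origem) := by
  unfold D_Distancias; infer_instance

def Spec_Distancias (n : Int) (origem : Int) (out : List Int) : Prop :=
  ¬ D_Distancias n origem → out = Distancias_alt n origem
instance (n : Int) (origem : Int) (out : List Int) : Decidable (Spec_Distancias n origem out) := by
  unfold Spec_Distancias; infer_instance

def pvDiffWitness_Distancias : Int × Int := (4, -2)
def pvDiffWitnessOut_Distancias : (List Int) × (List Int) := ([1, 2, 0, -1], [-1, -1, 0, -1])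

-- ===== CLAIM (what is proved, stated in full; the proofs are below) =====
def Claim_unchanged_Distancias : Prop := ∀ (n : Int) (origem : Int), Dom_Distancias n origem → Pre_Distancias n origem → Spec_Distancias n origem (Distancias n origem)
def Claim_exact_Distancias : Prop := ∀ (n : Int) (origem : Int), Dom_Distancias n origem → Pre_Distancias n origem → D_Distancias n origem → Distancias n origem ≠ Distancias_alt n origem
def Claim_changed_Distancias : Prop := Dom_Distancias (pvDiffWitness_Distancias.1) (pvDiffWitness_Distancias.2) ∧ Pre_Distancias (pvDiffWitness_Distancias.1) (pvDiffWitness_Distancias.2) ∧ D_Distancias (pvDiffWitness_Distancias.1) (pvDiffWitness_Distancias.2) ∧ Distancias (pvDiffWitness_Distancias.1) (pvDiffWitness_Distancias.2) = pvDiffWitnessOut_Distancias.1 ∧ Distancias_alt (pvDiffWitness_Distancias.1) (pvDiffWitness_Distancias.2) = pvDiffWitnessOut_Distancias.2 ∧ pvDiffWitnessOut_Distancias.1 ≠ pvDiffWitnessOut_Distancias.2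

-- ===== LEMMAS AND PROOFS =====

-- ===== VERDICT (by name: the statement is the Claim_ definition above) =====
theorem Distancias_spec : Claim_unchanged_Distancias := by
  unfold Claim_unchanged_Distancias
  intro n origem _ hpre
  unfold Pre_Distancias at hpre
  norm_num [pyA] at hpre
  obtain ⟨h1, h2, h3, h4⟩ := hpre
  unfold Spec_Distancias
  intro hnd
  interval_cases n <;> interval_cases origem <;> first
    | decide
    | (exact absurd (by decide) hnd)

theorem Distancias_changed : Claim_changed_Distancias := by
  unfold Claim_changed_Distancias; decide


theorem Distancias_tight : Claim_exact_Distancias := by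
  unfold Claim_exact_Distancias
  intro n origem _ hpre hd
  unfold Pre_Distancias at hpre
  unfold D_Distancias at hd
  norm_num [pyA] at hpre hd
  obtain ⟨h1, h2, h3, h4⟩ := hpre
  obtain ⟨g1, g2, g3, g4, g5, g6⟩ := hd
  interval_cases n <;> interval_cases origem <;> first
    | decide
    | (exfalso; omega)
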